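-- pv_equiv track=rewrite | github.com/Alejandra-RAF/Prueba_TSCD | Create_datamart2.py | lista_palabras_pesos
-- ===== SOURCE A (Python) =====
-- def difieren_en_una_letra(palabra1, palabra2):
--     if len(palabra1) != len(palabra2):
--         return False
--     diferencia = sum(1 for a, b in zip(palabra1, palabra2) if a != b)
--     return diferencia == 1
--
-- def lista_palabras_pesos(diccionario):
--     lista_pesos = []
--     palabras = list(diccionario.keys())
--
--     for i in range(len(palabras)):
--         for j in range(i + 1, len(palabras)):
--             palabra1 = palabras[i]
--             palabra2 = palabras[j]
--             if difieren_en_una_letra(palabra1, palabra2):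
--                 peso1 = diccionario[palabra1]
--                 peso2 = diccionario[palabra2]
--                 peso_conexion = abs(peso1 - peso2)
--                 lista_pesos.append((palabra1, palabra2, peso_conexion))
--     return lista_pesos
-- ===== SOURCE B (Python) =====
-- def lista_palabras_pesos(diccionario):
--     palabras = list(diccionario.keys())
--     n = len(palabras)
--     # one bucket per "word with one position cut out": words sharing a bucket differ in exactly that letter
--     entradas = [((w[:p], w[p + 1:]), i)
--                 for i, w in enumerate(palabras)
--                 for p in range(len(w))]
--     buckets = {}
--     for pat, i in entradas:
--         buckets.setdefault(pat, []).append(i)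
--     pares = []
--     for grupo in buckets.values():
--         pares += [(i, j) for a, i in enumerate(grupo) for j in grupo[a + 1:]]
--     pares.sort(key=lambda ij: ij[0] * n + ij[1])
--     return [(palabras[i], palabras[j], abs(diccionario[palabras[i]] - diccionario[palabras[j]]))
--             for i, j in pares]
-- ===== Notes on version B (the rewrite author's own statement) =====
-- stated objective: faster
-- what changed: Replaces the all-pairs O(n^2*L) letter-by-letter comparison with grouping words into buckets keyed by (prefix, suffix) patterns obtained by cutting out one position, emitting index pairs per bucket and sorting them by the rank i*n+j.
import Mathlib
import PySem

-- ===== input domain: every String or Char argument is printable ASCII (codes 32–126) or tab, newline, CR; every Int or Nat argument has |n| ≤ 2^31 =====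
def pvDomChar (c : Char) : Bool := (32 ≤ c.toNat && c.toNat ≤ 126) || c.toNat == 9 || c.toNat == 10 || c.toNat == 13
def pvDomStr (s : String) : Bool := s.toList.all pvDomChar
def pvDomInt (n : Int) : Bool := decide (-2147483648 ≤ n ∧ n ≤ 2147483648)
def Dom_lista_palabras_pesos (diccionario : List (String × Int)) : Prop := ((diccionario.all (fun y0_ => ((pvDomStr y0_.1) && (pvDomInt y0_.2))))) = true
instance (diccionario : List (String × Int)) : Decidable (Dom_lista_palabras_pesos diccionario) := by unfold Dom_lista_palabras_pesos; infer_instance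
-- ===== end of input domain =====

-- B replaces A's all-pairs letter-by-letter scan by bucketing words on their
-- "one position cut out" (prefix, suffix) patterns and sorting the bucket pairs
-- by the rank i*n+j (objective: faster).

-- ===== PORT A =====
def pvDifieren (palabra1 palabra2 : String) : Bool :=
  if PySem.Str.len palabra1 ≠ PySem.Str.len palabra2 then false
  else
    let diferencia : Int :=
      (((palabra1.toList.zip palabra2.toList).filter (fun ab => ab.1 != ab.2)).map
        (fun _ => (1 : Int))).sum
    diferencia == 1

def lista_palabras_pesos (diccionario : List (String × Int)) : List (String × String × Int) :=
  let d := PySem.Dict.ofList diccionario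
  let palabras := d.keys
  (PySem.List.pyRange 0 (palabras.length : Int)).foldl (fun lista i =>
    (PySem.List.pyRange (i + 1) (palabras.length : Int)).foldl (fun lista j =>
      let palabra1 := PySem.List.pyGetD palabras i ""
      let palabra2 := PySem.List.pyGetD palabras j ""
      if pvDifieren palabra1 palabra2 then
        -- diccionario[palabra1]: the key is always present (it comes from d.keys)
        let peso1 := d.getD palabra1 0
        let peso2 := d.getD palabra2 0
        lista ++ [(palabra1, palabra2, |peso1 - peso2|)]
      else lista) lista) []

-- ===== PORT B =====
def lista_palabras_pesos_alt (diccionario : List (String × Int)) : List (String × String × Int) :=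
  let d := PySem.Dict.ofList diccionario
  let palabras := d.keys
  let n : Int := (palabras.length : Int)
  let entradas : List ((String × String) × Int) :=
    palabras.zipIdx.flatMap (fun wi =>
      (PySem.List.pyRange 0 (PySem.Str.len wi.1)).map (fun p =>
        ((PySem.Str.slice wi.1 none (some p), PySem.Str.slice wi.1 (some (p + 1)) none),
         (wi.2 : Int))))
  let buckets : PySem.Dict (String × String) (List Int) :=
    entradas.foldl (fun b pi => b.modify pi.1 [] (fun g => g ++ [pi.2])) PySem.Dict.empty
  let pares : List (Int × Int) :=
    buckets.values.foldl (fun acc grupo =>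
      acc ++ grupo.zipIdx.flatMap (fun ia =>
        (PySem.List.slice grupo (some ((ia.2 : Int) + 1)) none).map (fun j => (ia.1, j)))) []
  let ordenado := PySem.List.sorted pares (fun ij => ij.1 * n + ij.2)
  ordenado.map (fun ij =>
    let w1 := PySem.List.pyGetD palabras ij.1 ""
    let w2 := PySem.List.pyGetD palabras ij.2 ""
    (w1, w2, |d.getD w1 0 - d.getD w2 0|))

-- ===== PRECONDITION & SPEC =====
def Spec_lista_palabras_pesos (diccionario : List (String × Int)) (out : List (String × String × Int)) : Prop := out = lista_palabras_pesos_alt diccionario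
instance (diccionario : List (String × Int)) (out : List (String × String × Int)) : Decidable (Spec_lista_palabras_pesos diccionario out) := by unfold Spec_lista_palabras_pesos; infer_instance

-- ===== CLAIM (what is proved, stated in full; the proofs are below) =====
def Claim_equal_lista_palabras_pesos : Prop := ∀ (diccionario : List (String × Int)), Dom_lista_palabras_pesos diccionario → Spec_lista_palabras_pesos diccionario (lista_palabras_pesos diccionario)

-- ===== LEMMAS AND PROOFS =====

-- proof-side abbreviations
def pvWAt (ws : List String) (i : Int) : String := PySem.List.pyGetD ws i ""

def pvKey (n : Int) (ij : Int × Int) : Int := ij.1 * n + ij.2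

def pvCanon (n : Nat) : List (Int × Int) :=
  List.flatMap (fun (i : Nat) =>
    List.map (fun (j : Nat) => ((i : Int), (j : Int)))
      (List.filter (fun j => decide (i < j)) (List.range n))) (List.range n)

def pvGood (ws : List String) : List (Int × Int) :=
  (pvCanon ws.length).filter (fun ij => pvDifieren (pvWAt ws ij.1) (pvWAt ws ij.2))

def pvEmit (d : PySem.Dict String Int) (ws : List String) (ij : Int × Int) : String × String × Int :=
  (pvWAt ws ij.1, pvWAt ws ij.2,
    |d.getD (pvWAt ws ij.1) 0 - d.getD (pvWAt ws ij.2) 0|)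

def pvPairsRec : List Int → List (Int × Int)
  | [] => []
  | x :: t => t.map (fun y => (x, y)) ++ pvPairsRec t

def pvStrPat (w : String) (p : Nat) : String × String :=
  (PySem.Str.slice w none (some (p : Int)), PySem.Str.slice w (some ((p : Int) + 1)) none)

def pvPats (w : String) : List (String × String) :=
  (List.range w.toList.length).map (pvStrPat w)

def pvEnt (ws : List String) : List ((String × String) × Int) :=
  List.flatMap (fun wk =>
    (List.range wk.1.toList.length).map (fun p => (pvStrPat wk.1 p, (wk.2 : Int)))) ws.zipIdx

def pvGroup (ws : List String) (c : String × String) : List Int :=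
  ((pvEnt ws).filter (fun e => e.1 == c)).map (fun e => e.2)

def pvBuckets (ws : List String) : PySem.Dict (String × String) (List Int) :=
  (pvEnt ws).foldl (fun b pi => b.modify pi.1 [] (fun g => g ++ [pi.2])) PySem.Dict.empty

-- pyRange ↑a ↑b lists the (casts of the) naturals in [a, b)
lemma pvRange_cast (a b : Nat) :
    PySem.List.pyRange (a : Int) (b : Int) =
      ((List.range b).filter (fun j => decide (a ≤ j))).map (fun (k : Nat) => (k : Int)) := by
  induction b with
  | zero =>
    have h : PySem.List.pyRange (a : Int) ((0 : Nat) : Int) = [] := by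
      apply List.eq_nil_iff_forall_not_mem.mpr
      intro x hx
      rcases PySem.List.mem_pyRange_one.mp hx with ⟨h1, h2⟩
      omega
    rw [h]
    rfl
  | succ b ih =>
    by_cases hab : a ≤ b
    · have hc : ((b + 1 : Nat) : Int) = (b : Int) + 1 := by push_cast; ring
      rw [hc, PySem.List.pyRange_one_succ_right (by exact_mod_cast hab)]
      rw [ih, List.range_succ]
      simp [List.filter_append, hab]
    · have h : PySem.List.pyRange (a : Int) ((b + 1 : Nat) : Int) = [] := by
        apply List.eq_nil_iff_forall_not_mem.mpr
        intro x hx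
        rcases PySem.List.mem_pyRange_one.mp hx with ⟨h1, h2⟩
        omega
      have h2 : (List.range (b + 1)).filter (fun j => decide (a ≤ j)) = [] := by
        apply List.filter_eq_nil_iff.mpr
        intro j hj
        have := List.mem_range.mp hj
        simp only [decide_eq_true_eq]
        omega
      rw [h, h2]
      rfl

lemma pvIfAppend {β : Type} (b : Bool) (acc : List β) (e : β) :
    (if b then acc ++ [e] else acc) = acc ++ (if b then [e] else []) := by
  cases b <;> simp

-- a "for x in l: if p: out.append(f x)" generator is filter+map
lemma pvFlatMap_if {α β : Type} (l : List α) (p : α → Bool) (f : α → β) :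
    List.flatMap (fun x => if p x then [f x] else []) l = (l.filter p).map f := by
  induction l with
  | nil => rfl
  | cons x t ih => by_cases h : p x <;> simp [List.flatMap_cons, h, ih]

lemma pvFlatMap_cast {β : Type} (l : List Nat) (F : Int → List β) :
    List.flatMap F (l.map (fun (k : Nat) => (k : Int))) = List.flatMap (fun (k : Nat) => F (k : Int)) l := by
  induction l with
  | nil => rfl
  | cons z t ih => rw [List.map_cons, List.flatMap_cons, List.flatMap_cons, ih]

-- the nested "for i in range(n): for j in range(i+1, n)" loop as one flatMap
lemma pvTriangle {β : Type} (n : Nat) (E : Int → Int → List β) (acc0 : List β) :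
    (PySem.List.pyRange 0 (n : Int)).foldl (fun acc i =>
        (PySem.List.pyRange (i + 1) (n : Int)).foldl (fun acc j => acc ++ E i j) acc) acc0
      = acc0 ++ List.flatMap (fun (k : Nat) =>
          List.flatMap (fun (l : Nat) => E (k : Int) (l : Int))
            (List.filter (fun j => decide (k + 1 ≤ j)) (List.range n))) (List.range n) := by
  rw [PySem.List.pyRange_zero_natCast, List.foldl_map]
  rw [PySem.List.foldl_congr_mem _ _
    (fun acc (k : Nat) => acc ++ List.flatMap (fun (l : Nat) => E (k : Int) (l : Int))
      (List.filter (fun j => decide (k + 1 ≤ j)) (List.range n))) acc0 ?_]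
  · rw [PySem.List.foldl_append_eq_flatMap]
  · intro acc k _
    have h1 : ((k : Int) + 1) = ((k + 1 : Nat) : Int) := by push_cast; ring
    rw [h1, pvRange_cast, PySem.List.foldl_append_eq_flatMap]
    congr 1
    exact pvFlatMap_cast _ _

-- PORT A's double loop equals the canonical filtered pair list
lemma pvA_flat (d : PySem.Dict String Int) (ws : List String) :
    List.flatMap (fun (k : Nat) =>
        List.map (fun (j : Nat) => (PySem.List.pyGetD ws (k : Int) "", PySem.List.pyGetD ws (j : Int) "",
            |d.getD (PySem.List.pyGetD ws (k : Int) "") 0 - d.getD (PySem.List.pyGetD ws (j : Int) "") 0|))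
          (List.filter (fun j => pvDifieren (PySem.List.pyGetD ws (k : Int) "") (PySem.List.pyGetD ws (j : Int) ""))
            (List.filter (fun j => decide (k + 1 ≤ j)) (List.range ws.length))))
      (List.range ws.length)
      = (pvGood ws).map (pvEmit d ws) := by
  unfold pvGood pvCanon pvEmit pvWAt
  rw [List.filter_flatMap, List.map_flatMap]
  apply congrArg (fun f => List.flatMap f (List.range ws.length))
  funext k
  rw [List.filter_map, List.map_map]
  have hp : (fun j => decide (k + 1 ≤ j)) = (fun j => decide (k < j)) := by
    funext j
    exact decide_eq_decide.mpr Nat.lt_iff_add_one_le.symm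
  rw [hp]
  rfl

lemma pvA_eq (diccionario : List (String × Int)) :
    lista_palabras_pesos diccionario =
      (pvGood (PySem.Dict.ofList diccionario).keys).map
        (pvEmit (PySem.Dict.ofList diccionario) (PySem.Dict.ofList diccionario).keys) := by
  simp only [lista_palabras_pesos]
  set d := PySem.Dict.ofList diccionario with hd
  set ws := d.keys with hws
  simp only [pvIfAppend]
  rw [pvTriangle ws.length
    (fun i j => if pvDifieren (PySem.List.pyGetD ws i "") (PySem.List.pyGetD ws j "") then
      [(PySem.List.pyGetD ws i "", PySem.List.pyGetD ws j "",
        |d.getD (PySem.List.pyGetD ws i "") 0 - d.getD (PySem.List.pyGetD ws j "") 0|)] else []) []]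
  rw [List.nil_append]
  simp only [pvFlatMap_if]
  exact pvA_flat d ws

-- ----- pattern helpers -----

lemma pvTake_toList (w : String) (p : Nat) :
    (PySem.Str.slice w none (some (p : Int))).toList = w.toList.take p := by
  rw [PySem.Str.toList_slice]
  show PySem.List.slice w.toList none (some (p : Int)) = _
  rw [PySem.List.slice_to _ (by omega : (0 : Int) ≤ (p : Int))]
  rw [Int.toNat_natCast]

lemma pvDrop_toList (w : String) (p : Nat) :
    (PySem.Str.slice w (some ((p : Int) + 1)) none).toList = w.toList.drop (p + 1) := by
  rw [PySem.Str.toList_slice]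
  show PySem.List.slice w.toList (some ((p : Int) + 1)) none = _
  have ht : ((p : Int) + 1).toNat = p + 1 := by omega
  rw [PySem.List.slice_from _ (by omega : (0 : Int) ≤ (p : Int) + 1), ht]

lemma pvPat_inj {u v : String} {p q : Nat} (hp : p ≤ u.toList.length)
    (h : pvStrPat u p = pvStrPat v q) (hq : q ≤ v.toList.length) : p = q := by
  have h1 := congrArg (fun c => c.1.toList.length) h
  simp only [pvStrPat] at h1
  rw [pvTake_toList, pvTake_toList, List.length_take, List.length_take] at h1
  omega

lemma pvPat_len {u v : String} {p q : Nat} (hp : p < u.toList.length) (hq : q < v.toList.length)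
    (h : pvStrPat u p = pvStrPat v q) : u.toList.length = v.toList.length ∧ p = q := by
  have hpq : p = q := pvPat_inj (le_of_lt hp) h (le_of_lt hq)
  subst hpq
  have h2 := congrArg (fun c => c.2.toList.length) h
  simp only [pvStrPat] at h2
  rw [pvDrop_toList, pvDrop_toList, List.length_drop, List.length_drop] at h2
  exact ⟨by omega, rfl⟩

lemma pvMem_pats (v : String) (c : String × String) :
    c ∈ pvPats v ↔ ∃ q, q < v.toList.length ∧ pvStrPat v q = c := by
  unfold pvPats
  rw [List.mem_map]
  constructor
  · rintro ⟨q, hq, he⟩; exact ⟨q, List.mem_range.mp hq, he⟩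
  · rintro ⟨q, hq, he⟩; exact ⟨q, List.mem_range.mpr hq, he⟩

lemma pvPats_nodup (w : String) : (pvPats w).Nodup := by
  unfold pvPats
  apply List.Nodup.map_on ?_ (List.nodup_range)
  intro p hp q hq h
  exact pvPat_inj (le_of_lt (List.mem_range.mp hp)) h (le_of_lt (List.mem_range.mp hq))

lemma pvPat_eq_iff_agree {u v : String} {p : Nat} (_hp : p < u.toList.length)
    (_hL : u.toList.length = v.toList.length) :
    pvStrPat u p = pvStrPat v p ↔ ∀ m, m ≠ p → u.toList[m]? = v.toList[m]? := by
  constructor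
  · intro h m hm
    have h1 : u.toList.take p = v.toList.take p := by
      have := congrArg (fun c => c.1.toList) h
      simp only [pvStrPat] at this
      rwa [pvTake_toList, pvTake_toList] at this
    have h2 : u.toList.drop (p + 1) = v.toList.drop (p + 1) := by
      have := congrArg (fun c => c.2.toList) h
      simp only [pvStrPat] at this
      rwa [pvDrop_toList, pvDrop_toList] at this
    by_cases hmp : m < p
    · have := congrArg (fun l => l[m]?) h1
      simpa [List.getElem?_take, hmp] using this
    · by_cases hmg : p + 1 ≤ m
      · have := congrArg (fun l => l[m - (p + 1)]?) h2
        simp only [List.getElem?_drop] at this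
        rwa [Nat.add_sub_cancel' hmg] at this
      · exact absurd (by omega) hm
  · intro h
    unfold pvStrPat
    refine Prod.ext_iff.mpr ⟨?_, ?_⟩
    · apply String.toList_injective
      rw [pvTake_toList, pvTake_toList]
      apply List.ext_getElem?
      intro i
      rw [List.getElem?_take, List.getElem?_take]
      split_ifs with hi
      · exact h i (by omega)
      · rfl
    · apply String.toList_injective
      rw [pvDrop_toList, pvDrop_toList]
      apply List.ext_getElem?
      intro i
      rw [List.getElem?_drop, List.getElem?_drop]
      exact h (p + 1 + i) (by omega)

-- ----- pvDifieren characterization -----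

lemma pvZip_eq (a b : List Char) (hL : a.length = b.length) :
    a.zip b = (List.range a.length).map (fun m => (a.getD m default, b.getD m default)) := by
  apply List.ext_getElem
  · simp [hL]
  · intro i h1 h2
    have hia : i < a.length := by
      simpa using h2
    rw [List.getElem_zip, List.getElem_map, List.getElem_range]
    rw [List.getD_eq_getElem _ _ hia, List.getD_eq_getElem _ _ (by omega : i < b.length)]

lemma pvMismatch_len (a b : List Char) (hL : a.length = b.length) :
    ((a.zip b).filter (fun ab => ab.1 != ab.2)).length
      = ((List.range a.length).filter (fun m => decide (a[m]? ≠ b[m]?))).length := by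
  rw [pvZip_eq a b hL, List.filter_map, List.length_map]
  apply congrArg List.length
  apply List.filter_congr
  intro m hm
  have hma : m < a.length := List.mem_range.mp hm
  have hmb : m < b.length := by omega
  simp only [Function.comp_apply]
  rw [List.getD_eq_getElem _ _ hma, List.getD_eq_getElem _ _ hmb]
  rw [List.getElem?_eq_getElem hma, List.getElem?_eq_getElem hmb]
  rcases eq_or_ne a[m] b[m] with he | he
  · simp [he]
  · simp [he]

lemma pvDifieren_false {u v : String} (hL : u.toList.length ≠ v.toList.length) :
    pvDifieren u v = false := by
  unfold pvDifieren
  rw [if_pos]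
  simp only [PySem.Str.len_eq, ne_eq, Nat.cast_inj]
  exact hL

lemma pvDifieren_eq {u v : String} (hL : u.toList.length = v.toList.length) :
    pvDifieren u v =
      decide ((((List.range u.toList.length).filter
        (fun m => decide (u.toList[m]? ≠ v.toList[m]?))).length) = 1) := by
  unfold pvDifieren
  rw [if_neg (by simp [PySem.Str.len_eq, hL])]
  show ((((u.toList.zip v.toList).filter (fun ab => ab.1 != ab.2)).map
      (fun _ => (1 : Int))).sum == 1) = _
  rw [PySem.List.sum_map_const_int, mul_one, pvMismatch_len _ _ hL]
  generalize ((List.range u.toList.length).filter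
      (fun m => decide (u.toList[m]? ≠ v.toList[m]?))).length = N
  by_cases h : N = 1
  · subst h; simp
  · have h2 : ((N : Int)) ≠ 1 := by exact_mod_cast h
    simp [h, h2]

-- two distinct words share exactly one pattern iff they differ in exactly one letter
lemma pvPats_common (u v : String) (hne : u ≠ v) :
    ((pvPats u).filter (fun c => decide (c ∈ pvPats v))).length
      = if pvDifieren u v then 1 else 0 := by
  by_cases hL : u.toList.length = v.toList.length
  · have hab : u.toList ≠ v.toList := fun h => hne (String.toList_injective h)
    have hLHS : ((pvPats u).filter (fun c => decide (c ∈ pvPats v))).length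
        = ((List.range u.toList.length).filter
            (fun p => decide (pvStrPat u p ∈ pvPats v))).length := by
      rw [show pvPats u = (List.range u.toList.length).map (pvStrPat u) from rfl]
      rw [List.filter_map, List.length_map]
      rfl
    rw [hLHS, pvDifieren_eq hL]
    simp only [decide_eq_true_eq]
    have hgood : ∀ p, p < u.toList.length →
        ((pvStrPat u p ∈ pvPats v) ↔ ∀ m, m ≠ p → u.toList[m]? = v.toList[m]?) := by
      intro p hp
      constructor
      · intro hmem
        rcases (pvMem_pats v _).mp hmem with ⟨q, hq, he⟩
        have hpq : p = q := (pvPat_len hp hq he.symm).2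
        subst hpq
        exact (pvPat_eq_iff_agree hp hL).mp he.symm
      · intro h
        exact (pvMem_pats v _).mpr ⟨p, by omega, ((pvPat_eq_iff_agree hp hL).mpr h).symm⟩
    have hDmem : ∀ m, m ∈ (List.range u.toList.length).filter
        (fun m => decide (u.toList[m]? ≠ v.toList[m]?)) ↔
        (m < u.toList.length ∧ u.toList[m]? ≠ v.toList[m]?) := by
      intro m
      rw [List.mem_filter, List.mem_range]
      simp
    have hDne : (List.range u.toList.length).filter
        (fun m => decide (u.toList[m]? ≠ v.toList[m]?)) ≠ [] := by
      intro h0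
      apply hab
      have hall := List.filter_eq_nil_iff.mp h0
      apply List.ext_getElem?
      intro m
      by_cases hm : m < u.toList.length
      · have h := hall m (List.mem_range.mpr hm)
        simpa using h
      · rw [List.getElem?_eq_none (by omega), List.getElem?_eq_none (by omega)]
    rcases hDcase : (List.range u.toList.length).filter
        (fun m => decide (u.toList[m]? ≠ v.toList[m]?)) with _ | ⟨m0, rest⟩
    · exact absurd hDcase hDne
    rcases rest with _ | ⟨m1, rest2⟩
    · -- exactly one mismatch
      have hm0 : m0 < u.toList.length ∧ u.toList[m0]? ≠ v.toList[m0]? :=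
        (hDmem m0).mp (by rw [hDcase]; exact List.mem_singleton.mpr rfl)
      have honly : ∀ m, u.toList[m]? ≠ v.toList[m]? → m = m0 := by
        intro m hm
        by_cases hmL : m < u.toList.length
        · have : m ∈ (List.range u.toList.length).filter
              (fun m => decide (u.toList[m]? ≠ v.toList[m]?)) := (hDmem m).mpr ⟨hmL, hm⟩
          rw [hDcase] at this
          simpa using this
        · exact absurd (by rw [List.getElem?_eq_none (by omega), List.getElem?_eq_none (by omega)]) hm
      have hfe : (List.range u.toList.length).filter (fun p => decide (pvStrPat u p ∈ pvPats v))
          = (List.range u.toList.length).filter (fun p => p == m0) := by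
        apply List.filter_congr
        intro p hp
        have hp' := List.mem_range.mp hp
        rw [show ((p == m0) = decide (p = m0)) from rfl, decide_eq_decide, hgood p hp']
        constructor
        · intro h
          by_contra hpm
          exact hm0.2 (h m0 (fun he => hpm he.symm))
        · intro hpm m hmp
          subst hpm
          by_contra hcon
          exact hmp (honly m hcon)
      rw [hfe, List.filter_beq, List.length_replicate, List.count_range, if_pos hm0.1]
      simp
    · -- at least two mismatches
      have hm1 : m0 ∈ (List.range u.toList.length).filter
          (fun m => decide (u.toList[m]? ≠ v.toList[m]?)) := by rw [hDcase]; simp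
      have hm2 : m1 ∈ (List.range u.toList.length).filter
          (fun m => decide (u.toList[m]? ≠ v.toList[m]?)) := by rw [hDcase]; simp
      have hne01 : m0 ≠ m1 := by
        have hnd : ((List.range u.toList.length).filter
            (fun m => decide (u.toList[m]? ≠ v.toList[m]?))).Nodup :=
          List.Nodup.filter _ (List.nodup_range)
        rw [hDcase] at hnd
        intro he
        exact (List.nodup_cons.mp hnd).1 (he ▸ List.mem_cons_self)
      have hflt : (List.range u.toList.length).filter
          (fun p => decide (pvStrPat u p ∈ pvPats v)) = [] := by
        apply List.filter_eq_nil_iff.mpr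
        intro p hp
        simp only [decide_eq_true_eq]
        intro hmem
        have h := (hgood p (List.mem_range.mp hp)).mp hmem
        have e0 : m0 = p := by
          by_contra h0
          exact ((hDmem m0).mp hm1).2 (h m0 h0)
        have e1 : m1 = p := by
          by_contra h1
          exact ((hDmem m1).mp hm2).2 (h m1 h1)
        exact hne01 (e0.trans e1.symm)
      rw [hflt]
      rw [if_neg (by simp)]
      rfl
  · rw [pvDifieren_false hL, if_neg (by simp)]
    suffices h : (pvPats u).filter (fun c => decide (c ∈ pvPats v)) = [] by rw [h]; rfl
    apply List.filter_eq_nil_iff.mpr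
    intro c hc
    simp only [decide_eq_true_eq]
    intro hcv
    rcases (pvMem_pats u c).mp hc with ⟨p, hp, hpe⟩
    rcases (pvMem_pats v c).mp hcv with ⟨q, hq, hqe⟩
    exact hL (pvPat_len hp hq (hpe.trans hqe.symm)).1

-- ----- canonical list: strictly increasing rank -----

lemma pvCanon_pairwise (n : Nat) :
    (pvCanon n).Pairwise (fun a b => pvKey (n : Int) a < pvKey (n : Int) b) := by
  unfold pvCanon
  rw [List.pairwise_flatMap]
  constructor
  · intro i _
    rw [List.pairwise_map]
    refine List.Pairwise.imp_of_mem ?_ (List.Pairwise.filter _ List.pairwise_lt_range)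
    intro j j' hj hj' hlt
    have hj2 : (j : Int) < (j' : Int) := by exact_mod_cast hlt
    show (i : Int) * n + j < (i : Int) * n + j'
    linarith
  · refine List.Pairwise.imp_of_mem ?_ List.pairwise_lt_range
    intro i i' hi hi' hlt x hx y hy
    rcases List.mem_map.mp hx with ⟨j, hj, rfl⟩
    rcases List.mem_map.mp hy with ⟨j', hj', rfl⟩
    have hjn : j < n := List.mem_range.mp (List.mem_filter.mp hj).1
    show (i : Int) * n + j < (i' : Int) * n + j'
    have h1 : (i : Int) * n + j < ((i : Int) + 1) * n := by
      have hj2 : (j : Int) < (n : Int) := by exact_mod_cast hjn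
      have : ((i : Int) + 1) * n = (i : Int) * n + n := by ring
      rw [this]
      linarith
    have h2 : ((i : Int) + 1) * n ≤ (i' : Int) * n := by
      apply mul_le_mul_of_nonneg_right
      · have : (i : Int) < (i' : Int) := by exact_mod_cast hlt
        linarith
      · positivity
    have h3 : (0 : Int) ≤ j' := by positivity
    linarith

lemma pvGood_pairwise (ws : List String) :
    (pvGood ws).Pairwise
      (fun a b => pvKey (ws.length : Int) a < pvKey (ws.length : Int) b) := by
  unfold pvGood
  exact List.Pairwise.filter _ (pvCanon_pairwise ws.length)

lemma pvGood_nodup (ws : List String) : (pvGood ws).Nodup := by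
  refine (pvGood_pairwise ws).imp ?_
  intro a b hab heq
  rw [heq] at hab
  exact lt_irrefl _ hab

lemma pvMem_good (ws : List String) (z : Int × Int) :
    z ∈ pvGood ws ↔ ∃ k l : Nat, k < l ∧ l < ws.length ∧ z = ((k : Int), (l : Int)) ∧
      pvDifieren (pvWAt ws (k : Int)) (pvWAt ws (l : Int)) = true := by
  unfold pvGood pvCanon
  rw [List.mem_filter]
  constructor
  · rintro ⟨hmem, hdif⟩
    rcases List.mem_flatMap.mp hmem with ⟨k, hk, hz⟩
    rcases List.mem_map.mp hz with ⟨l, hl, rfl⟩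
    rcases List.mem_filter.mp hl with ⟨hl1, hl2⟩
    exact ⟨k, l, by simpa using hl2, List.mem_range.mp hl1, rfl, hdif⟩
  · rintro ⟨k, l, hkl, hl, rfl, hdif⟩
    refine ⟨List.mem_flatMap.mpr ⟨k, List.mem_range.mpr (by omega),
      List.mem_map.mpr ⟨l, List.mem_filter.mpr ⟨List.mem_range.mpr hl, by simpa using hkl⟩, rfl⟩⟩, hdif⟩

-- ----- entries, buckets, groups -----

lemma pvZipIdx_pairwise {α : Type} (l : List α) (n0 : Nat) :
    (l.zipIdx n0).Pairwise (fun a b => a.2 < b.2) := by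
  induction l generalizing n0 with
  | nil => simp
  | cons x t ih =>
    rw [List.zipIdx_cons, List.pairwise_cons]
    constructor
    · rintro ⟨e, i⟩ he
      rcases List.mem_zipIdx he with ⟨h1, -, -⟩
      show n0 < i
      omega
    · exact ih (n0 + 1)

lemma pvEnt_pairwise (ws : List String) :
    (pvEnt ws).Pairwise (fun e e' => e.2 < e'.2 ∨ (e.2 = e'.2 ∧ e.1 ≠ e'.1)) := by
  unfold pvEnt
  rw [List.pairwise_flatMap]
  constructor
  · intro wk _
    rw [List.pairwise_map]
    have h := pvPats_nodup wk.1
    unfold pvPats at h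
    have h2 := List.pairwise_map.mp h
    exact h2.imp (fun hne => Or.inr ⟨rfl, hne⟩)
  · refine List.Pairwise.imp_of_mem ?_ (pvZipIdx_pairwise ws 0)
    intro a b ha hb hab x hx y hy
    rcases List.mem_map.mp hx with ⟨p, -, rfl⟩
    rcases List.mem_map.mp hy with ⟨q, -, rfl⟩
    refine Or.inl ?_
    show ((a.2 : Nat) : Int) < ((b.2 : Nat) : Int)
    exact_mod_cast hab

lemma pvMem_ent (ws : List String) (c : String × String) (x : Int) :
    (c, x) ∈ pvEnt ws ↔
      ∃ k : Nat, k < ws.length ∧ x = (k : Int) ∧ c ∈ pvPats (pvWAt ws (k : Int)) := by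
  unfold pvEnt
  rw [List.mem_flatMap]
  constructor
  · rintro ⟨⟨w, k⟩, hwk, hmem⟩
    have hget := List.mem_zipIdx_iff_getElem?.mp hwk
    have hk : k < ws.length := by
      by_contra h
      rw [List.getElem?_eq_none (by omega)] at hget
      exact absurd hget (by simp)
    have hw : ws[k] = w := by
      rw [List.getElem?_eq_getElem hk] at hget
      exact Option.some.inj hget
    rcases List.mem_map.mp hmem with ⟨p, hp, he⟩
    injection he with h1 h2
    refine ⟨k, hk, h2.symm, ?_⟩
    have hwa : pvWAt ws (k : Int) = w := by
      unfold pvWAt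
      rw [PySem.List.pyGetD_natCast, List.getD_eq_getElem _ _ hk, hw]
    rw [hwa, ← h1]
    unfold pvPats
    exact List.mem_map.mpr ⟨p, hp, rfl⟩
  · rintro ⟨k, hk, rfl, hc⟩
    have hwa : pvWAt ws (k : Int) = ws[k] := by
      unfold pvWAt
      rw [PySem.List.pyGetD_natCast, List.getD_eq_getElem _ _ hk]
    refine ⟨(ws[k], k), ?_, ?_⟩
    · exact List.mem_zipIdx_iff_getElem?.mpr (by simp [List.getElem?_eq_getElem hk])
    · rw [hwa] at hc
      unfold pvPats at hc
      rcases List.mem_map.mp hc with ⟨p, hp, hpe⟩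
      exact List.mem_map.mpr ⟨p, hp, by rw [hpe]⟩

lemma pvMem_group (ws : List String) (c : String × String) (x : Int) :
    x ∈ pvGroup ws c ↔ (c, x) ∈ pvEnt ws := by
  unfold pvGroup
  rw [List.mem_map]
  constructor
  · rintro ⟨e, he, rfl⟩
    rcases List.mem_filter.mp he with ⟨hmem, hbeq⟩
    have h1 : e.1 = c := eq_of_beq hbeq
    subst h1
    exact hmem
  · intro h
    exact ⟨(c, x), List.mem_filter.mpr ⟨h, by simp⟩, rfl⟩

lemma pvGroup_pairwise (ws : List String) (c : String × String) :
    (pvGroup ws c).Pairwise (· < ·) := by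
  unfold pvGroup
  rw [List.pairwise_map]
  apply List.pairwise_filter.mpr
  refine (pvEnt_pairwise ws).imp ?_
  intro e e' hR hq hq'
  rcases hR with h | ⟨-, hne⟩
  · exact h
  · exact absurd ((eq_of_beq hq).trans (eq_of_beq hq').symm) hne

lemma pvBuckets_keys_nodup (ws : List String) : (pvBuckets ws).keys.Nodup := by
  unfold pvBuckets
  exact PySem.Dict.nodup_keys_foldl_modify_key (pvEnt ws) (fun e => e.1) []
    (fun _ e => fun g => g ++ [e.2]) PySem.Dict.empty (by simp)

lemma pvMem_keys (ws : List String) (c : String × String) :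
    c ∈ (pvBuckets ws).keys ↔ c ∈ List.map (fun e => e.1) (pvEnt ws) := by
  unfold pvBuckets
  rw [PySem.Dict.keys_foldl_modify_key]
  show c ∈ PySem.Set.ofList (List.map (fun e => e.1) (pvEnt ws)) ↔ _
  exact PySem.Set.mem_ofList _ _

lemma pvBuckets_getD (ws : List String) (c : String × String) :
    (pvBuckets ws).getD c [] = pvGroup ws c := by
  unfold pvBuckets pvGroup
  rw [PySem.Dict.getD_foldl_modify_append]
  rw [PySem.Dict.getD_empty, List.nil_append]

-- ----- per-group pair generation -----

lemma pvS1_aux (full : List Int) : ∀ (g : List Int) (n : Nat), full.drop n = g →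
    List.flatMap (fun ia => (full.drop (ia.2 + 1)).map (fun j => (ia.1, j))) (g.zipIdx n)
      = pvPairsRec g := by
  intro g
  induction g with
  | nil => intro n h; simp [pvPairsRec]
  | cons x t ih =>
    intro n h
    rw [List.zipIdx_cons, List.flatMap_cons]
    have hd : full.drop (n + 1) = t := by
      rw [← List.drop_drop, h]
      rfl
    rw [ih (n + 1) hd]
    rw [show pvPairsRec (x :: t) = t.map (fun y => (x, y)) ++ pvPairsRec t from rfl]
    congr 1
    show (full.drop (n + 1)).map (fun j => (x, j)) = t.map fun y => (x, y)
    rw [hd]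

lemma pvS1 (g : List Int) :
    List.flatMap (fun ia =>
        (PySem.List.slice g (some ((ia.2 : Int) + 1)) none).map (fun j => (ia.1, j))) g.zipIdx
      = pvPairsRec g := by
  have h : ∀ ia : Int × Nat,
      PySem.List.slice g (some ((ia.2 : Int) + 1)) none = g.drop (ia.2 + 1) := by
    intro ia
    have ht : ((ia.2 : Int) + 1).toNat = ia.2 + 1 := by omega
    rw [PySem.List.slice_from _ (by omega : (0 : Int) ≤ (ia.2 : Int) + 1), ht]
  simp only [h]
  exact pvS1_aux g g 0 (by simp)

lemma pvS2 (g : List Int) (hg : g.Pairwise (· < ·)) (x y : Int) :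
    (pvPairsRec g).count (x, y) = if x ∈ g ∧ y ∈ g ∧ x < y then 1 else 0 := by
  induction g with
  | nil => simp [pvPairsRec]
  | cons a t ih =>
    rw [List.pairwise_cons] at hg
    obtain ⟨ha, ht⟩ := hg
    have hat : a ∉ t := fun h => lt_irrefl a (ha a h)
    have htnd : t.Nodup := ht.imp (fun h => ne_of_lt h)
    rw [show pvPairsRec (a :: t) = t.map (fun y0 => (a, y0)) ++ pvPairsRec t from rfl]
    rw [List.count_append, ih ht]
    have hmap : (t.map (fun y0 => (a, y0))).count (x, y) = if x = a ∧ y ∈ t then 1 else 0 := by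
      by_cases hx : x = a
      · subst hx
        have hcnt : (t.map (fun y0 => (x, y0))).count (x, y) = t.count y := by
          simpa using List.count_map_of_injective t (fun y0 => (x, y0))
            (fun p q h => by simpa using h) y
        rw [hcnt]
        by_cases hy : y ∈ t
        · simp [hy, List.count_eq_one_of_mem htnd hy]
        · simp [hy, List.count_eq_zero_of_not_mem hy]
      · have hnm : (x, y) ∉ t.map (fun y0 => (a, y0)) := by
          intro h
          rcases List.mem_map.mp h with ⟨y0, -, he⟩
          injection he with h1 _
          exact hx h1.symm
        simp [List.count_eq_zero_of_not_mem hnm, hx]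
    rw [hmap]
    simp only [List.mem_cons]
    by_cases hx : x = a
    · by_cases hy : y ∈ t
      · have h3 : x < y := by rw [hx]; exact ha y hy
        rw [if_pos ⟨hx, hy⟩, if_neg (fun hc => hat (by rw [← hx]; exact hc.1)),
          if_pos ⟨Or.inl hx, Or.inr hy, h3⟩]
      · have hnc : ¬ ((x = a ∨ x ∈ t) ∧ (y = a ∨ y ∈ t) ∧ x < y) := by
          rintro ⟨-, hyc, hlt2⟩
          rcases hyc with hya | hyt
          · rw [hx, hya] at hlt2
            exact lt_irrefl _ hlt2
          · exact hy hyt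
        rw [if_neg (fun hc => hy hc.2), if_neg (fun hc => hat (by rw [← hx]; exact hc.1)),
          if_neg hnc]
    · by_cases hxt : x ∈ t
      · by_cases hy : y ∈ t
        · by_cases hlt2 : x < y
          · rw [if_neg (fun hc => hx hc.1), if_pos ⟨hxt, hy, hlt2⟩,
              if_pos ⟨Or.inr hxt, Or.inr hy, hlt2⟩]
          · rw [if_neg (fun hc => hx hc.1), if_neg (fun hc => hlt2 hc.2.2),
              if_neg (fun hc => hlt2 hc.2.2)]
        · have hnc : ¬ ((x = a ∨ x ∈ t) ∧ (y = a ∨ y ∈ t) ∧ x < y) := by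
            rintro ⟨-, hyc, hlt2⟩
            rcases hyc with rfl | hyt
            · exact absurd hlt2 (not_lt.mpr (le_of_lt (ha x hxt)))
            · exact hy hyt
          rw [if_neg (fun hc => hx hc.1), if_neg (fun hc => hy hc.2.1), if_neg hnc]
      · have hnc : ¬ ((x = a ∨ x ∈ t) ∧ (y = a ∨ y ∈ t) ∧ x < y) := by
          rintro ⟨hxc, -, -⟩
          rcases hxc with rfl | h
          · exact hx rfl
          · exact hxt h
        rw [if_neg (fun hc => hx hc.1), if_neg (fun hc => hxt hc.1), if_neg hnc]

-- ----- counting -----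

lemma pvSum_ite_one {α : Type} (l : List α) (P : α → Prop) [DecidablePred P] :
    (l.map (fun a => if P a then (1 : Nat) else 0)).sum
      = (l.filter (fun a => decide (P a))).length := by
  induction l with
  | nil => rfl
  | cons x t ih =>
    by_cases h : P x
    · rw [List.map_cons, List.sum_cons, if_pos h, ih,
        List.filter_cons_of_pos (by simpa using h), List.length_cons]
      omega
    · rw [List.map_cons, List.sum_cons, if_neg h, ih,
        List.filter_cons_of_neg (by simpa using h)]
      omega

lemma pvCount_core (ws : List String) (hnd : ws.Nodup) (x y : Int) :
    ((pvBuckets ws).keys.filter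
      (fun c => decide ((c, x) ∈ pvEnt ws ∧ (c, y) ∈ pvEnt ws ∧ x < y))).length
      = (pvGood ws).count (x, y) := by
  by_cases hxy : ∃ k l : Nat, k < ws.length ∧ l < ws.length ∧ x = (k : Int) ∧ y = (l : Int) ∧ k < l
  · obtain ⟨k, l, hk, hl, rfl, rfl, hkl⟩ := hxy
    have hgu : pvWAt ws (k : Int) = ws[k] := by
      unfold pvWAt
      rw [PySem.List.pyGetD_natCast, List.getD_eq_getElem _ _ hk]
    have hgv : pvWAt ws (l : Int) = ws[l] := by
      unfold pvWAt
      rw [PySem.List.pyGetD_natCast, List.getD_eq_getElem _ _ hl]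
    have huv : pvWAt ws (k : Int) ≠ pvWAt ws (l : Int) := by
      rw [hgu, hgv]
      intro h
      exact absurd ((hnd.getElem_inj_iff).mp h) (by omega)
    have hpred : ∀ c, (((c, ((k : Nat) : Int)) ∈ pvEnt ws ∧ ((c, ((l : Nat) : Int)) ∈ pvEnt ws) ∧ ((k : Nat) : Int) < ((l : Nat) : Int))) ↔
        (c ∈ pvPats (pvWAt ws (k : Int)) ∧ c ∈ pvPats (pvWAt ws (l : Int))) := by
      intro c
      constructor
      · rintro ⟨h1, h2, -⟩
        rcases (pvMem_ent ws c _).mp h1 with ⟨k', hk', hke, hc1⟩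
        have hkk : k' = k := by exact_mod_cast hke.symm
        subst hkk
        rcases (pvMem_ent ws c _).mp h2 with ⟨l', hl', hle, hc2⟩
        have hll : l' = l := by exact_mod_cast hle.symm
        subst hll
        exact ⟨hc1, hc2⟩
      · rintro ⟨h1, h2⟩
        exact ⟨(pvMem_ent ws c _).mpr ⟨k, hk, rfl, h1⟩,
          (pvMem_ent ws c _).mpr ⟨l, hl, rfl, h2⟩, by exact_mod_cast hkl⟩
    have hlen : ((pvBuckets ws).keys.filter
        (fun c => decide ((c, ((k : Nat) : Int)) ∈ pvEnt ws ∧ ((c, ((l : Nat) : Int)) ∈ pvEnt ws) ∧ ((k : Nat) : Int) < ((l : Nat) : Int)))).length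
        = ((pvPats (pvWAt ws (k : Int))).filter
            (fun c => decide (c ∈ pvPats (pvWAt ws (l : Int))))).length := by
      apply List.Perm.length_eq
      apply (List.perm_ext_iff_of_nodup ((pvBuckets_keys_nodup ws).filter _)
        ((pvPats_nodup _).filter _)).mpr
      intro c
      simp only [List.mem_filter, decide_eq_true_eq]
      constructor
      · rintro ⟨-, hp⟩
        exact ⟨((hpred c).mp hp).1, ((hpred c).mp hp).2⟩
      · rintro ⟨h1, h2⟩
        refine ⟨?_, (hpred c).mpr ⟨h1, h2⟩⟩
        apply (pvMem_keys ws c).mpr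
        exact List.mem_map.mpr ⟨(c, ((k : Nat) : Int)),
          (pvMem_ent ws c _).mpr ⟨k, hk, rfl, h1⟩, rfl⟩
    rw [hlen, pvPats_common _ _ huv]
    by_cases hdif : pvDifieren (pvWAt ws (k : Int)) (pvWAt ws (l : Int)) = true
    · rw [if_pos hdif]
      exact (List.count_eq_one_of_mem (pvGood_nodup ws)
        ((pvMem_good ws _).mpr ⟨k, l, hkl, hl, rfl, hdif⟩)).symm
    · rw [if_neg hdif]
      symm
      apply List.count_eq_zero_of_not_mem
      intro hmem
      rcases (pvMem_good ws _).mp hmem with ⟨k', l', hkl', hl', he, hdif'⟩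
      injection he with he1 he2
      have hkk : k = k' := by exact_mod_cast he1
      have hll : l = l' := by exact_mod_cast he2
      subst hkk; subst hll
      exact hdif hdif'
  · have h1 : (pvBuckets ws).keys.filter
        (fun c => decide ((c, x) ∈ pvEnt ws ∧ (c, y) ∈ pvEnt ws ∧ x < y)) = [] := by
      apply List.filter_eq_nil_iff.mpr
      intro c hc
      simp only [decide_eq_true_eq]
      rintro ⟨hcx, hcy, hlt⟩
      rcases (pvMem_ent ws c x).mp hcx with ⟨k, hk, rfl, -⟩
      rcases (pvMem_ent ws c y).mp hcy with ⟨l, hl, rfl, -⟩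
      exact hxy ⟨k, l, hk, hl, rfl, rfl, by exact_mod_cast hlt⟩
    rw [h1]
    symm
    apply List.count_eq_zero_of_not_mem
    intro hmem
    rcases (pvMem_good ws _).mp hmem with ⟨k, l, hkl, hl, he, -⟩
    injection he with he1 he2
    subst he1; subst he2
    exact hxy ⟨k, l, by omega, hl, rfl, rfl, hkl⟩

lemma pvCount (ws : List String) (hnd : ws.Nodup) (z : Int × Int) :
    (List.flatMap pvPairsRec (pvBuckets ws).values).count z = (pvGood ws).count z := by
  obtain ⟨x, y⟩ := z
  rw [List.count_flatMap]
  rw [PySem.Dict.values_eq_map_keys _ (pvBuckets_keys_nodup ws) ([] : List Int)]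
  rw [List.map_map]
  rw [List.map_congr_left
    (g := fun c => if (c, x) ∈ pvEnt ws ∧ (c, y) ∈ pvEnt ws ∧ x < y then (1 : Nat) else 0) ?_]
  · rw [pvSum_ite_one]
    exact pvCount_core ws hnd x y
  · intro c hc
    simp only [Function.comp_apply]
    rw [pvBuckets_getD, pvS2 _ (pvGroup_pairwise ws c) x y]
    simp only [pvMem_group]

-- ----- PORT B equals the same canonical form -----

lemma pvB_eq (diccionario : List (String × Int)) :
    lista_palabras_pesos_alt diccionario =
      (pvGood (PySem.Dict.ofList diccionario).keys).map
        (pvEmit (PySem.Dict.ofList diccionario) (PySem.Dict.ofList diccionario).keys) := by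
  simp only [lista_palabras_pesos_alt]
  set d := PySem.Dict.ofList diccionario with hd
  set ws := d.keys with hws
  have hnd : ws.Nodup := PySem.Dict.nodup_keys_ofList diccionario
  have hent : List.flatMap (fun wi =>
      (PySem.List.pyRange 0 (PySem.Str.len wi.1)).map (fun p =>
        ((PySem.Str.slice wi.1 none (some p), PySem.Str.slice wi.1 (some (p + 1)) none),
         (wi.2 : Int)))) ws.zipIdx = pvEnt ws := by
    unfold pvEnt
    apply congrArg (fun f => List.flatMap f ws.zipIdx)
    funext wi
    rw [PySem.Str.len_eq, PySem.List.pyRange_zero_natCast, List.map_map]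
    rfl
  rw [hent]
  rw [show (pvEnt ws).foldl (fun b pi => b.modify pi.1 [] (fun g => g ++ [pi.2]))
      PySem.Dict.empty = pvBuckets ws from rfl]
  rw [PySem.List.foldl_append_eq_flatMap, List.nil_append]
  simp only [pvS1]
  have heta : List.flatMap (fun grupo => pvPairsRec grupo) (pvBuckets ws).values
      = List.flatMap pvPairsRec (pvBuckets ws).values := rfl
  rw [heta]
  have hperm : (pvGood ws).Perm (List.flatMap pvPairsRec (pvBuckets ws).values) :=
    List.perm_iff_count.mpr (fun z => (pvCount ws hnd z).symm)
  have hpair : (pvGood ws).Pairwise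
      (fun a b => a.1 * (ws.length : Int) + a.2 < b.1 * (ws.length : Int) + b.2) :=
    pvGood_pairwise ws
  rw [PySem.List.sorted_eq_of_perm_of_pairwise_lt _ (pvGood ws)
    (fun ij => ij.1 * (ws.length : Int) + ij.2) hperm hpair]
  rfl

-- ===== VERDICT (by name: the statement is the Claim_ definition above) =====
theorem lista_palabras_pesos_spec : Claim_equal_lista_palabras_pesos := by
  intro diccionario _
  unfold Spec_lista_palabras_pesos
  rw [pvA_eq, pvB_eq]
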